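-- pv_equiv track=rewrite | github.com/michaelvanstraten/Mathematics-B.Sc. | courses/algebra-i/problemset-8.py | diagonal_product
-- ===== SOURCE A (Python) =====
-- def diagonal_product(a, b):
--     ia, ib = iter(a), iter(b)
--     A, B = [], []
--     n = 0
--
--     while True:
--         # Extend caches to cover this diagonal
--         while len(A) <= n:
--             try:
--                 A.append(next(ia))
--             except StopIteration:
--                 break
--         while len(B) <= n:
--             try:
--                 B.append(next(ib))
--             except StopIteration:
--                 break
--
--         emitted = False
--         for i in range(n + 1):
--             j = n - i
--             if i < len(A) and j < len(B):
--                 yield (A[i], B[j])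
--                 emitted = True
--
--         if not emitted:  # both exhausted beyond last diagonal
--             return
--
--         n += 1
-- ===== SOURCE B (Python) =====
-- def diagonal_product(a, b):
--     A, B = list(a), list(b)
--     p, q = len(A), len(B)
--     if p == 0 or q == 0:
--         return
--     for n in range(p + q - 1):
--         for i in range(max(0, n + 1 - q), min(n, p - 1) + 1):
--             yield (A[i], B[n - i])
-- ===== Notes on version B (the rewrite author's own statement) =====
-- stated objective: faster
-- what changed: Replaces A's incremental iterator-caching sweep that tests every index i in 0..n on each diagonal (plus an emitted-flag probe past the last diagonal) with a direct loop that materialises both inputs once and, for each diagonal n, iterates only the closed-form valid index interval [max(0, n+1-q), min(n, p-1)].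
import Mathlib
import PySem

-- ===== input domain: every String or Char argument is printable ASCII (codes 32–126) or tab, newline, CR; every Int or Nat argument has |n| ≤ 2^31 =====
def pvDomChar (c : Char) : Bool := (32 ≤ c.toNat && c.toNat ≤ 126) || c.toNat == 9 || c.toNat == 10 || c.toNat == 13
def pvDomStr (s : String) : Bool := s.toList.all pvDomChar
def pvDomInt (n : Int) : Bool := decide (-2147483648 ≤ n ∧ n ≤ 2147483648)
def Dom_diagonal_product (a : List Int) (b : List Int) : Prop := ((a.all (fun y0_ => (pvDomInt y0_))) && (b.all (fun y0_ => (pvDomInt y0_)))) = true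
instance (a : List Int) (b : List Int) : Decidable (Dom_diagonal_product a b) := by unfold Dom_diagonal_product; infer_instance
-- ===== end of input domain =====

-- B replaces A's cache-growing diagonal sweep (which scans all i ≤ n on every diagonal)
-- by directly iterating the valid index interval of each diagonal; objective: faster.
-- Both are generators over lists; each yielded pair (x, y) is ported as the list [x, y].

-- ===== PORT A =====
-- 'while len(cache) <= n: try: cache.append(next(it)) except StopIteration: break'
-- (an iterator over a list = the list of elements not yet consumed)
def pvExtend (cache it : List Int) (n : Nat) : List Int × List Int :=
  if cache.length ≤ n then
    match it with
    | [] => (cache, [])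
    | x :: rest => pvExtend (cache ++ [x]) rest n
  else (cache, it)
termination_by it.length

-- the 'while True' loop; fuel is a totality guard only: the loop body returns
-- (emitted = False) before fuel runs out (proved in the lemmas below).
def pvLoopA (fuel : Nat) (A B ra rb : List Int) (n : Nat) (acc : List (List Int)) :
    List (List Int) :=
  match fuel with
  | 0 => acc
  | fuel' + 1 =>
    let eA := pvExtend A ra n
    let eB := pvExtend B rb n
    -- 'for i in range(n+1): j = n-i; if i < len(A) and j < len(B): yield (A[i], B[j]); emitted = True'
    -- the guard makes both indices in range, so getD ‥ 0 is exact for A[i] / B[j]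
    let step := (List.range (n + 1)).foldl
      (fun (s : List (List Int) × Bool) i =>
        if i < eA.1.length ∧ n - i < eB.1.length then
          (s.1 ++ [[eA.1.getD i 0, eB.1.getD (n - i) 0]], true)
        else s)
      (acc, false)
    if step.2 then pvLoopA fuel' eA.1 eB.1 eA.2 eB.2 (n + 1) step.1 else step.1

def diagonal_product (a : List Int) (b : List Int) : List (List Int) :=
  pvLoopA (a.length + b.length + 1) [] [] a b 0 []

-- ===== PORT B =====
-- 'for n in range(p+q-1): for i in range(max(0, n+1-q), min(n, p-1)+1): yield (A[i], B[n-i])'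
-- all bounds are ≥ 0, so Python's range(lo, hi) is List.range' lo (hi - lo) over Nat (exact);
-- indices are in range, so getD ‥ 0 is exact for A[i] / B[n-i].
def diagonal_product_alt (a : List Int) (b : List Int) : List (List Int) :=
  let p := a.length
  let q := b.length
  if p = 0 ∨ q = 0 then []
  else
    (List.range (p + q - 1)).flatMap (fun n =>
      (List.range' (n + 1 - q) (min n (p - 1) + 1 - (n + 1 - q))).map
        (fun i => [a.getD i 0, b.getD (n - i) 0]))

-- ===== PRECONDITION & SPEC =====
def Spec_diagonal_product (a : List Int) (b : List Int) (out : List (List Int)) : Prop := out = diagonal_product_alt a b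
instance (a : List Int) (b : List Int) (out : List (List Int)) : Decidable (Spec_diagonal_product a b out) := by unfold Spec_diagonal_product; infer_instance

-- ===== CLAIM (what is proved, stated in full; the proofs are below) =====
def Claim_equal_diagonal_product : Prop := ∀ (a : List Int) (b : List Int), Dom_diagonal_product a b → Spec_diagonal_product a b (diagonal_product a b)

-- ===== LEMMAS AND PROOFS =====

-- the canonical diagonal-n row, the common form both ports are reduced to
def pvRow (a b : List Int) (n : Nat) : List (List Int) :=
  ((List.range (n + 1)).filter (fun i => decide (i < a.length ∧ n - i < b.length))).map
    (fun i => [a.getD i 0, b.getD (n - i) 0])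

theorem pvExtend_eq (it : List Int) : ∀ (cache : List Int) (n : Nat),
    pvExtend cache it n =
      if cache.length ≤ n then
        (cache ++ it.take (n + 1 - cache.length), it.drop (n + 1 - cache.length))
      else (cache, it) := by
  induction it with
  | nil => intro cache n; unfold pvExtend; split <;> simp
  | cons x rest ih =>
    intro cache n
    unfold pvExtend
    by_cases h : cache.length ≤ n
    · rw [if_pos h, if_pos h]
      show pvExtend (cache ++ [x]) rest n
        = (cache ++ List.take (n + 1 - cache.length) (x :: rest),
           List.drop (n + 1 - cache.length) (x :: rest))
      rw [ih]
      by_cases h2 : cache.length + 1 ≤ n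
      · rw [if_pos (by simpa using h2)]
        have e1 : n + 1 - cache.length = (n - cache.length) + 1 := by omega
        simp [e1]
      · rw [if_neg (by simpa using h2)]
        have e1 : n + 1 - cache.length = 1 := by omega
        simp [e1]
    · rw [if_neg h, if_neg h]

theorem pvExtend_take (a : List Int) (n : Nat) :
    pvExtend (a.take n) (a.drop n) n = (a.take (n + 1), a.drop (n + 1)) := by
  rw [pvExtend_eq, if_pos (by simp)]
  by_cases h : n ≤ a.length
  · have hmin : (a.take n).length = n := by simp; omega
    rw [hmin]
    have e1 : n + 1 - n = 1 := by omega
    rw [e1]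
    refine Prod.ext ?_ ?_
    · show a.take n ++ (a.drop n).take 1 = a.take (n + 1)
      rw [← List.take_add]
    · show (a.drop n).drop 1 = a.drop (n + 1)
      rw [List.drop_drop]
  · have h1 : a.take n = a := List.take_of_length_le (by omega)
    have h2 : a.take (n + 1) = a := List.take_of_length_le (by omega)
    have h3 : a.drop n = [] := List.drop_eq_nil_of_le (by omega)
    have h4 : a.drop (n + 1) = [] := List.drop_eq_nil_of_le (by omega)
    simp [h1, h2, h3, h4]

theorem pvPairFold {α β : Type} (p : α → Prop) [DecidablePred p] (f : α → β) :
    ∀ (l : List α) (acc : List β) (e : Bool),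
      l.foldl (fun s i => if p i then (s.1 ++ [f i], true) else s) (acc, e)
        = (acc ++ (l.filter (fun i => decide (p i))).map f,
           e || !(l.filter (fun i => decide (p i))).isEmpty) := by
  intro l
  induction l with
  | nil => intro acc e; simp
  | cons x rest ih =>
    intro acc e
    by_cases h : p x
    · simp only [List.foldl_cons, if_pos h, ih, List.filter_cons, decide_eq_true h]
      simp
    · simp only [List.foldl_cons, if_neg h, ih, List.filter_cons]
      simp [h]

theorem pvFilterRange' (lo hi : Nat) : ∀ (c s : Nat),
    (List.range' s c).filter (fun i => decide (lo ≤ i ∧ i < hi))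
      = List.range' (max s lo) (min (s + c) hi - max s lo) := by
  intro c
  induction c with
  | zero =>
    intro s
    have h0 : min (s + 0) hi - max s lo = 0 := by omega
    rw [h0]
    simp
  | succ c ih =>
    intro s
    rw [List.range'_succ, List.filter_cons]
    by_cases h : lo ≤ s ∧ s < hi
    · rw [if_pos (by simpa using h), ih]
      have e1 : max s lo = s := by omega
      have e2 : max (s + 1) lo = s + 1 := by omega
      have e3 : min (s + (c + 1)) hi - s = (min (s + 1 + c) hi - (s + 1)) + 1 := by omega
      rw [e1, e2, e3, List.range'_succ]
    · rw [if_neg (by simpa using h), ih]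
      by_cases h2 : s < lo
      · have e1 : max (s + 1) lo = max s lo := by omega
        have e2 : min (s + 1 + c) hi = min (s + (c + 1)) hi := by omega
        rw [e1, e2]
      · have e1 : min (s + 1 + c) hi - max (s + 1) lo = 0 := by omega
        have e2 : min (s + (c + 1)) hi - max s lo = 0 := by omega
        simp [e1, e2]

theorem pvRow_empty_iff (a b : List Int) (n : Nat) (hp : a.length ≠ 0) (hq : b.length ≠ 0) :
    pvRow a b n = [] ↔ a.length + b.length - 1 ≤ n := by
  rw [pvRow, List.map_eq_nil_iff, List.filter_eq_nil_iff]
  simp only [List.mem_range, decide_eq_true_eq]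
  constructor
  · intro h
    by_contra hlt
    exact h (min n (a.length - 1)) (by omega) ⟨by omega, by omega⟩
  · intro h i hi hpred
    omega

theorem pvRow_trunc (a b : List Int) (n : Nat) :
    ((List.range (n + 1)).filter
        (fun i => decide (i < (a.take (n + 1)).length ∧ n - i < (b.take (n + 1)).length))).map
      (fun i => [(a.take (n + 1)).getD i 0, (b.take (n + 1)).getD (n - i) 0])
      = pvRow a b n := by
  rw [pvRow]
  rw [List.filter_congr (q := fun i => decide (i < a.length ∧ n - i < b.length))
      (by intro i hi; simp only [List.mem_range] at hi; simp only [List.length_take]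
          exact decide_eq_decide.mpr (by omega))]
  apply List.map_congr_left
  intro i hi
  have hm := List.mem_filter.mp hi
  simp only [List.mem_range, decide_eq_true_eq] at hm
  have hi1 : i < n + 1 := hm.1
  have g1 : (a.take (n + 1)).getD i 0 = a.getD i 0 := by
    simp [List.getD_eq_getElem?_getD, hi1]
  have g2 : (b.take (n + 1)).getD (n - i) 0 = b.getD (n - i) 0 := by
    have hni : n - i < n + 1 := by omega
    simp [List.getD_eq_getElem?_getD, hni]
  rw [g1, g2]

theorem pvLoop_inv (a b : List Int) (hp : a.length ≠ 0) (hq : b.length ≠ 0) :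
    ∀ (fuel n : Nat) (acc : List (List Int)), a.length + b.length ≤ n + fuel →
      pvLoopA fuel (a.take n) (b.take n) (a.drop n) (b.drop n) n acc
        = acc ++ (List.range' n (a.length + b.length - 1 - n)).flatMap (pvRow a b) := by
  intro fuel
  induction fuel with
  | zero =>
    intro n acc hle
    have h0 : a.length + b.length - 1 - n = 0 := by omega
    simp [pvLoopA, h0]
  | succ fuel ih =>
    intro n acc hle
    simp only [pvLoopA, pvExtend_take]
    rw [pvPairFold (fun i => i < (a.take (n + 1)).length ∧ n - i < (b.take (n + 1)).length)
        (fun i => [(a.take (n + 1)).getD i 0, (b.take (n + 1)).getD (n - i) 0])]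
    simp only [pvRow_trunc, Bool.false_or]
    rw [List.filter_congr (q := fun i => decide (i < a.length ∧ n - i < b.length))
        (by intro i hi; simp only [List.mem_range] at hi; simp only [List.length_take]
            exact decide_eq_decide.mpr (by omega))]
    have hcond : (List.filter (fun i => decide (i < a.length ∧ n - i < b.length))
        (List.range (n + 1))).isEmpty = (pvRow a b n).isEmpty := by
      rw [pvRow, List.isEmpty_map]
    rw [hcond]
    by_cases hrow : pvRow a b n = []
    · have hge : a.length + b.length - 1 ≤ n := (pvRow_empty_iff a b n hp hq).mp hrow
      have h0 : a.length + b.length - 1 - n = 0 := by omega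
      simp [hrow, h0]
    · have hemit : (pvRow a b n).isEmpty = false := by
        cases h : pvRow a b n with
        | nil => exact absurd h hrow
        | cons y ys => simp
      rw [hemit]
      simp only [Bool.not_false, if_pos]
      rw [ih (n + 1) (acc ++ pvRow a b n) (by omega)]
      have hlt : n < a.length + b.length - 1 := by
        by_contra hge
        exact hrow ((pvRow_empty_iff a b n hp hq).mpr (by omega))
      rw [show a.length + b.length - 1 - n = (a.length + b.length - 1 - (n + 1)) + 1 from by omega,
          List.range'_succ, List.flatMap_cons, List.append_assoc]

theorem pvAlt_eq (a b : List Int) (hp : a.length ≠ 0) (hq : b.length ≠ 0) :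
    diagonal_product_alt a b
      = (List.range' 0 (a.length + b.length - 1)).flatMap (pvRow a b) := by
  rw [diagonal_product_alt]
  simp only [if_neg (by omega : ¬ (a.length = 0 ∨ b.length = 0))]
  rw [List.range_eq_range']
  congr 1
  funext n
  rw [pvRow, List.range_eq_range']
  rw [List.filter_congr (q := fun i => decide (n + 1 - b.length ≤ i ∧ i < min n (a.length - 1) + 1))
      (by intro i hi
          rw [List.mem_range'_1] at hi
          exact decide_eq_decide.mpr (by omega))]
  rw [pvFilterRange']
  have e1 : max 0 (n + 1 - b.length) = n + 1 - b.length := by omega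
  have e2 : min (0 + (n + 1)) (min n (a.length - 1) + 1) = min n (a.length - 1) + 1 := by omega
  rw [e1, e2]

-- ===== VERDICT (by name: the statement is the Claim_ definition above) =====
theorem diagonal_product_spec : Claim_equal_diagonal_product := by
  intro a b _
  unfold Spec_diagonal_product
  by_cases hdeg : a.length = 0 ∨ b.length = 0
  · rcases hdeg with h | h
    · have ha : a = [] := List.length_eq_zero_iff.mp h
      subst ha
      rw [diagonal_product, diagonal_product_alt]
      simp [pvLoopA, pvExtend_eq, List.range_succ]
    · have hb : b = [] := List.length_eq_zero_iff.mp h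
      subst hb
      rw [diagonal_product, diagonal_product_alt]
      simp [pvLoopA, pvExtend_eq, List.range_succ]
  · have hdeg' : a.length ≠ 0 ∧ b.length ≠ 0 :=
      ⟨fun h => hdeg (Or.inl h), fun h => hdeg (Or.inr h)⟩
    obtain ⟨hp, hq⟩ := hdeg'
    rw [diagonal_product]
    have h0 : pvLoopA (a.length + b.length + 1) [] [] a b 0 []
        = pvLoopA (a.length + b.length + 1) (a.take 0) (b.take 0) (a.drop 0) (b.drop 0) 0 [] := by
      simp
    rw [h0, pvLoop_inv a b hp hq (a.length + b.length + 1) 0 [] (by omega),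
        pvAlt_eq a b hp hq]
    simp
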